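-- pv_equiv track=rewrite | github.com/Innobytix-IT/Zuse | Zuse 7.3/sprach_tests/run_all.py | ist_echter_fehler
-- ===== SOURCE A (Python) =====
-- def ist_echter_fehler(stdout, stderr):
--     if stderr:
--         return True
--     lines = stdout.split('\n')
--     for line in lines:
--         # Syntaxfehler / uncaught errors
--         if any(kw in line for kw in ['Syntaxfehler', 'Syntax error', 'Error de sintaxis',
--                                       'Erreur de syntaxe', 'Errore di sintassi',
--                                       'Erro de sintaxe', 'codec can\'t',
--                                       'Traceback', 'RuntimeError']):
--             return True
--         # "Fehler:" am Zeilenanfang = uncaught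
--         if line.strip().startswith('Fehler:'):
--             return True
--     return False
-- ===== SOURCE B (Python) =====
-- _KEYWORDS = ['Syntaxfehler', 'Syntax error', 'Error de sintaxis',
--              'Erreur de syntaxe', 'Errore di sintassi',
--              'Erro de sintaxe', "codec can't", 'Traceback', 'RuntimeError']
--
--
-- def ist_echter_fehler(stdout, stderr):
--     if stderr:
--         return True
--     # no keyword contains a newline, so one whole-string scan replaces the per-line loop
--     if any(kw in stdout for kw in _KEYWORDS):
--         return True
--     # single pass: 'Fehler:' occurring with only whitespace before it on its line
--     at_start = True
--     for i, c in enumerate(stdout):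
--         if c == '\n':
--             at_start = True
--         elif at_start:
--             if c.isspace():
--                 pass
--             elif stdout.startswith('Fehler:', i):
--                 return True
--             else:
--                 at_start = False
--     return False
-- ===== Notes on version B (the rewrite author's own statement) =====
-- stated objective: alternative
-- what changed: A's per-line loop (split('\n') with a nested any over keywords plus strip().startswith per line) is replaced by one whole-string membership test per keyword (valid since no keyword contains a newline) and a single character pass with an at_start flag that detects 'Fehler:' preceded only by whitespace on its line.
import Mathlib
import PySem

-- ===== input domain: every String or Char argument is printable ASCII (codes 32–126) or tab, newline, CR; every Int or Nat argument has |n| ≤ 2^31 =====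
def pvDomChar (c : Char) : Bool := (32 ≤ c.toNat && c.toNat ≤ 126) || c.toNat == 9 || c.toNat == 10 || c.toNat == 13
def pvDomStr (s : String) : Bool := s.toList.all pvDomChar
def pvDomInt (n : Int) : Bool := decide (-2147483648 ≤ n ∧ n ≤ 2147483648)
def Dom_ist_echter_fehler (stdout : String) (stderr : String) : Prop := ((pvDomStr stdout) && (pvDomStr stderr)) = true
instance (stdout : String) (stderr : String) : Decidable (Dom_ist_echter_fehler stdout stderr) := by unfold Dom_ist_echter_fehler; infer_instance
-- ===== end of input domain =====

-- B replaces A's per-line loop by one whole-string keyword scan plus a single-pass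
-- line-start scanner for "Fehler:" (alternative decomposition; same return value).

-- ===== PORT A =====
def pvKeywords : List (List Char) :=
  ["Syntaxfehler".toList, "Syntax error".toList, "Error de sintaxis".toList,
   "Erreur de syntaxe".toList, "Errore di sintassi".toList,
   "Erro de sintaxe".toList, "codec can't".toList,
   "Traceback".toList, "RuntimeError".toList]

-- the for-loop over stdout.split('\n') with its two early returns
def pvLoopA : List (List Char) → Bool
  | [] => false
  | line :: rest =>
    if pvKeywords.any (fun kw => PySem.Chars.isIn kw line) then true
    else if PySem.Chars.startswith (PySem.Chars.strip line) "Fehler:".toList then true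
    else pvLoopA rest

def ist_echter_fehler (stdout : String) (stderr : String) : Bool :=
  if stderr = "" then pvLoopA (PySem.Chars.splitOn stdout.toList ['\n'])
  else true

-- ===== PORT B =====
-- for i, c in enumerate(stdout): ... (single pass with the at_start flag)
def pvScanB : List Char → Bool → Bool
  | [], _ => false
  | c :: rest, atStart =>
    if c = '\n' then pvScanB rest true
    else if atStart then
      if PySem.Chars.isspace c then pvScanB rest true
      else if PySem.Chars.startswith (c :: rest) "Fehler:".toList then true
      else pvScanB rest false
    else pvScanB rest false

def ist_echter_fehler_alt (stdout : String) (stderr : String) : Bool :=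
  if stderr = "" then
    if pvKeywords.any (fun kw => PySem.Chars.isIn kw stdout.toList) then true
    else pvScanB stdout.toList true
  else true

-- ===== PRECONDITION & SPEC =====
def Spec_ist_echter_fehler (stdout : String) (stderr : String) (out : Bool) : Prop := out = ist_echter_fehler_alt stdout stderr
instance (stdout : String) (stderr : String) (out : Bool) : Decidable (Spec_ist_echter_fehler stdout stderr out) := by unfold Spec_ist_echter_fehler; infer_instance

-- ===== CLAIM (what is proved, stated in full; the proofs are below) =====
def Claim_equal_ist_echter_fehler : Prop := ∀ (stdout : String) (stderr : String), Dom_ist_echter_fehler stdout stderr → Spec_ist_echter_fehler stdout stderr (ist_echter_fehler stdout stderr)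

-- ===== LEMMAS AND PROOFS =====

-- structural version of splitting on '\n'
def nlSplit : List Char → List (List Char)
  | [] => [[]]
  | c :: rest => if c = '\n' then [] :: nlSplit rest else (nlSplit rest).modifyHead (c :: ·)

lemma nlSplit_eq_cons (cs : List Char) :
    nlSplit cs = cs.takeWhile (fun c => !(c == '\n')) :: (nlSplit cs).tail := by
  induction cs with
  | nil => simp [nlSplit]
  | cons c rest ih =>
    by_cases hc : c = '\n'
    · simp [nlSplit, hc]
    · conv_lhs => rw [nlSplit]
      conv_rhs => rw [nlSplit]
      simp only [if_neg hc]
      rw [ih, List.modifyHead_cons, List.takeWhile_cons,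
        if_pos (show (!(c == '\n')) = true by simp [hc]), List.tail_cons]

lemma nlSplit_cons_nl (rest : List Char) : nlSplit ('\n' :: rest) = [] :: nlSplit rest := by
  simp [nlSplit]

lemma nlSplit_cons_of_ne {c : Char} (rest : List Char) (hc : c ≠ '\n') :
    nlSplit (c :: rest) = (c :: rest.takeWhile (fun c => !(c == '\n'))) :: (nlSplit rest).tail := by
  rw [nlSplit]
  simp only [if_neg hc]
  rw [nlSplit_eq_cons rest, List.modifyHead_cons, List.tail_cons]

lemma go_eq (fuel : Nat) : ∀ (l cur : List Char) (acc : List (List Char)), l.length < fuel →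
    PySem.Chars.splitOn.go ['\n'] fuel l cur acc
      = acc.reverse ++ (nlSplit l).modifyHead (cur.reverse ++ ·) := by
  induction fuel with
  | zero => intro l cur acc h; omega
  | succ fuel ih =>
    intro l cur acc h
    cases l with
    | nil =>
      rw [PySem.Chars.splitOn.go]
      · simp [nlSplit]
      · omega
    | cons c rest =>
      rw [PySem.Chars.splitOn.go]
      by_cases hc : c = '\n'
      · have hpre : List.isPrefixOf ['\n'] (c :: rest) = true := by
          simp [List.isPrefixOf_iff_prefix, hc]
        rw [if_pos hpre]
        simp only [List.length_cons] at h
        rw [show (List.drop ['\n'].length (c :: rest)) = rest by simp]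
        rw [ih rest [] (cur.reverse :: acc) (by omega)]
        rw [hc, nlSplit_cons_nl]
        rw [nlSplit_eq_cons rest, List.modifyHead_cons, List.modifyHead_cons]
        simp
      · have hpre : List.isPrefixOf ['\n'] (c :: rest) = false := by
          simp only [Bool.eq_false_iff, ne_eq, List.isPrefixOf_iff_prefix, List.cons_prefix_cons]
          rintro ⟨h1, -⟩
          exact hc h1.symm
        rw [hpre]
        simp only [Bool.false_eq_true, if_false]
        simp only [List.length_cons] at h
        rw [ih rest (c :: cur) acc (by omega)]
        rw [nlSplit_cons_of_ne rest hc]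
        rw [nlSplit_eq_cons rest, List.modifyHead_cons, List.modifyHead_cons]
        simp

lemma splitOn_eq_nlSplit (cs : List Char) :
    PySem.Chars.splitOn cs ['\n'] = nlSplit cs := by
  unfold PySem.Chars.splitOn
  rw [go_eq (cs.length + 1) cs [] [] (by omega)]
  rw [nlSplit_eq_cons cs, List.modifyHead_cons]
  simp

-- A's loop is an `any` over the lines
lemma pvLoopA_eq_any (ls : List (List Char)) :
    pvLoopA ls = ls.any (fun l =>
      pvKeywords.any (fun kw => PySem.Chars.isIn kw l)
      || PySem.Chars.startswith (PySem.Chars.strip l) "Fehler:".toList) := by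
  induction ls with
  | nil => simp [pvLoopA]
  | cons l rest ih =>
    rw [pvLoopA, ih]
    by_cases h1 : pvKeywords.any (fun kw => PySem.Chars.isIn kw l) = true
    · simp [h1]
    · simp only [Bool.not_eq_true] at h1
      by_cases h2 : PySem.Chars.startswith (PySem.Chars.strip l) "Fehler:".toList = true
      · simp [h1, h2]
      · simp only [Bool.not_eq_true] at h2
        simp [h1, h2]

-- stripping trailing whitespace does not affect a "Fehler:" prefix
lemma prefix_rstrip_iff (m : List Char) :
    "Fehler:".toList <+: PySem.Chars.rstrip m ↔ "Fehler:".toList <+: m := by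
  constructor
  · intro hp
    refine hp.trans ?_
    unfold PySem.Chars.rstrip
    rw [show m = m.reverse.reverse by simp]
    rw [List.reverse_prefix]
    simpa using List.dropWhile_suffix (l := m.reverse) PySem.Chars.isspace
  · rintro ⟨t, rfl⟩
    unfold PySem.Chars.rstrip
    rw [List.reverse_append, List.dropWhile_append]
    have hF : List.dropWhile PySem.Chars.isspace ("Fehler:".toList.reverse) = "Fehler:".toList.reverse := by
      decide
    split
    · rw [hF]
      simp
    · rw [List.reverse_append, List.reverse_reverse]
      exact ⟨_, rfl⟩

lemma startswith_strip_eq (l : List Char) :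
    PySem.Chars.startswith (PySem.Chars.strip l) "Fehler:".toList
      = PySem.Chars.startswith (PySem.Chars.lstrip l) "Fehler:".toList := by
  unfold PySem.Chars.strip PySem.Chars.startswith
  rw [Bool.eq_iff_iff, List.isPrefixOf_iff_prefix, List.isPrefixOf_iff_prefix]
  exact prefix_rstrip_iff _

-- a newline-free prefix lives inside the first line
lemma prefix_takeWhile_iff (p : List Char) : ∀ cs : List Char, '\n' ∉ p →
    (p <+: cs ↔ p <+: cs.takeWhile (fun c => !(c == '\n'))) := by
  induction p with
  | nil => intro cs _; simp
  | cons a p' ih =>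
    intro cs hnl
    have ha : a ≠ '\n' := fun h => hnl (by simp [h])
    have hnl' : '\n' ∉ p' := fun h => hnl (by simp [h])
    cases cs with
    | nil => simp
    | cons c rest =>
      rw [List.takeWhile_cons]
      by_cases hc : c = '\n'
      · subst hc
        simp only [beq_self_eq_true, Bool.not_true, Bool.false_eq_true, if_false]
        constructor
        · intro h
          rw [List.cons_prefix_cons] at h
          exact absurd h.1 ha
        · intro h
          simp at h
      · have : (!(c == '\n')) = true := by simp [hc]
        rw [this]
        simp only [if_true]
        rw [List.cons_prefix_cons, List.cons_prefix_cons, ih rest hnl']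

-- per-keyword: occurring in some line ↔ occurring in the whole string
lemma kw_lines_iff {kw : List Char} (hnl : '\n' ∉ kw) (hne : kw ≠ []) (cs : List Char) :
    (∃ l ∈ nlSplit cs, kw <:+: l) ↔ kw <:+: cs := by
  induction cs with
  | nil => simp [nlSplit]
  | cons c rest ih =>
    by_cases hc : c = '\n'
    · subst hc
      rw [nlSplit_cons_nl, List.infix_cons_iff]
      constructor
      · rintro ⟨l, hl, hkw⟩
        rcases List.mem_cons.mp hl with rfl | hl
        · rw [List.infix_nil] at hkw
          exact absurd hkw hne
        · exact Or.inr (ih.mp ⟨l, hl, hkw⟩)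
      · rintro (hp | hi)
        · cases kw with
          | nil => exact absurd rfl hne
          | cons k kw' =>
            rw [List.cons_prefix_cons] at hp
            exact absurd hp.1.symm (fun h => hnl (List.mem_cons.mpr (Or.inl h)))
        · obtain ⟨l, hl, hkw⟩ := ih.mpr hi
          exact ⟨l, List.mem_cons_of_mem _ hl, hkw⟩
    · rw [nlSplit_cons_of_ne rest hc, List.infix_cons_iff]
      have htw := nlSplit_eq_cons rest
      constructor
      · rintro ⟨l, hl, hkw⟩
        rcases List.mem_cons.mp hl with rfl | hl
        · rcases List.infix_cons_iff.mp hkw with hp | hi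
          · left
            cases kw with
            | nil => exact List.nil_prefix
            | cons k kw' =>
              have hnl' : '\n' ∉ kw' := fun h => hnl (by simp [h])
              rw [List.cons_prefix_cons] at hp ⊢
              exact ⟨hp.1, (prefix_takeWhile_iff kw' rest hnl').mpr hp.2⟩
          · right
            exact ih.mp ⟨_, by rw [htw]; exact List.mem_cons_self, hi⟩
        · right
          exact ih.mp ⟨l, by rw [htw]; exact List.mem_cons_of_mem _ hl, hkw⟩
      · rintro (hp | hi)
        · refine ⟨_, List.mem_cons_self, ?_⟩
          apply List.infix_cons_iff.mpr
          left
          cases kw with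
          | nil => exact List.nil_prefix
          | cons k kw' =>
            have hnl' : '\n' ∉ kw' := fun h => hnl (by simp [h])
            rw [List.cons_prefix_cons] at hp ⊢
            exact ⟨hp.1, (prefix_takeWhile_iff kw' rest hnl').mp hp.2⟩
        · obtain ⟨l, hl, hkw⟩ := ih.mpr hi
          rw [htw] at hl
          rcases List.mem_cons.mp hl with rfl | hl
          · exact ⟨_, List.mem_cons_self, List.infix_cons_iff.mpr (Or.inr hkw)⟩
          · exact ⟨l, List.mem_cons_of_mem _ hl, hkw⟩

-- B's scanner computes "some line, after lstrip, starts with Fehler:"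
lemma scan_eq (cs : List Char) :
    (pvScanB cs true = (nlSplit cs).any
        (fun l => PySem.Chars.startswith (PySem.Chars.lstrip l) "Fehler:".toList))
    ∧ (pvScanB cs false = ((nlSplit cs).tail).any
        (fun l => PySem.Chars.startswith (PySem.Chars.lstrip l) "Fehler:".toList)) := by
  induction cs with
  | nil => constructor <;> simp [pvScanB, nlSplit] <;> decide
  | cons c rest ih =>
    obtain ⟨ih1, ih2⟩ := ih
    by_cases hc : c = '\n'
    · subst hc
      rw [nlSplit_cons_nl]
      constructor
      · rw [pvScanB, if_pos rfl, ih1]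
        simp [PySem.Chars.startswith, PySem.Chars.lstrip]
      · rw [pvScanB, if_pos rfl, ih1]
        simp
    · have htw := nlSplit_eq_cons rest
      rw [nlSplit_cons_of_ne rest hc]
      refine ⟨?_, ?_⟩
      · rw [pvScanB, if_neg hc, if_pos rfl]
        by_cases hws : PySem.Chars.isspace c = true
        · rw [if_pos hws, ih1, htw]
          simp only [List.any_cons]
          have : PySem.Chars.lstrip (c :: rest.takeWhile (fun c => !(c == '\n')))
              = PySem.Chars.lstrip (rest.takeWhile (fun c => !(c == '\n'))) := by
            simp [PySem.Chars.lstrip, List.dropWhile_cons, hws]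
          rw [this, List.tail_cons]
        · rw [if_neg hws]
          have hls : PySem.Chars.lstrip (c :: rest.takeWhile (fun c => !(c == '\n')))
              = c :: rest.takeWhile (fun c => !(c == '\n')) := by
            simp only [Bool.not_eq_true] at hws
            simp [PySem.Chars.lstrip, List.dropWhile_cons, hws]
          have hFd : "Fehler:".toList = 'F' :: "ehler:".toList := rfl
          have hFnl : '\n' ∉ "ehler:".toList := by decide
          by_cases hsw : PySem.Chars.startswith (c :: rest) "Fehler:".toList = true
          · rw [if_pos hsw]
            simp only [List.any_cons, hls]
            unfold PySem.Chars.startswith at hsw ⊢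
            rw [List.isPrefixOf_iff_prefix] at hsw
            rw [hFd, List.cons_prefix_cons] at hsw
            have : "Fehler:".toList <+: c :: rest.takeWhile (fun c => !(c == '\n')) := by
              rw [hFd, List.cons_prefix_cons]
              exact ⟨hsw.1, (prefix_takeWhile_iff _ rest hFnl).mp hsw.2⟩
            rw [show List.isPrefixOf "Fehler:".toList (c :: rest.takeWhile (fun c => !(c == '\n'))) = true
              from List.isPrefixOf_iff_prefix.mpr this]
            simp
          · rw [if_neg hsw, ih2]
            simp only [List.any_cons, hls]
            have : PySem.Chars.startswith (c :: rest.takeWhile (fun c => !(c == '\n'))) "Fehler:".toList = false := by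
              rw [Bool.eq_false_iff]
              intro hpre
              apply hsw
              unfold PySem.Chars.startswith at hpre ⊢
              rw [List.isPrefixOf_iff_prefix] at hpre ⊢
              rw [hFd, List.cons_prefix_cons] at hpre ⊢
              exact ⟨hpre.1, (prefix_takeWhile_iff _ rest hFnl).mpr hpre.2⟩
            unfold PySem.Chars.startswith at this ⊢
            rw [this]
            simp
      · rw [pvScanB, if_neg hc]
        simp only [Bool.false_eq_true, if_false, List.tail_cons]
        exact ih2

-- the main equation between the two bodies
lemma main_eq (cs : List Char) :
    pvLoopA (PySem.Chars.splitOn cs ['\n'])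
      = (if pvKeywords.any (fun kw => PySem.Chars.isIn kw cs) then true else pvScanB cs true) := by
  rw [splitOn_eq_nlSplit, pvLoopA_eq_any]
  simp only [startswith_strip_eq]
  have hkws : ∀ kw ∈ pvKeywords, '\n' ∉ kw ∧ kw ≠ [] := by decide
  by_cases hK : pvKeywords.any (fun kw => PySem.Chars.isIn kw cs) = true
  · rw [if_pos hK]
    rw [List.any_eq_true] at hK
    obtain ⟨kw, hkw, hin⟩ := hK
    rw [PySem.Chars.isIn_iff_infix] at hin
    obtain ⟨l, hl, hinf⟩ := (kw_lines_iff (hkws kw hkw).1 (hkws kw hkw).2 cs).mpr hin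
    rw [List.any_eq_true]
    exact ⟨l, hl, by
      simp only [Bool.or_eq_true]
      left
      rw [List.any_eq_true]
      exact ⟨kw, hkw, (PySem.Chars.isIn_iff_infix _ _).mpr hinf⟩⟩
  · rw [if_neg hK, (scan_eq cs).1]
    rw [Bool.eq_iff_iff, List.any_eq_true, List.any_eq_true]
    constructor
    · rintro ⟨l, hl, hor⟩
      rcases Bool.or_eq_true _ _ |>.mp hor with hkw | hf
      · exfalso
        apply hK
        rw [List.any_eq_true] at hkw ⊢
        obtain ⟨kw, hkwm, hin⟩ := hkw
        rw [PySem.Chars.isIn_iff_infix] at hin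
        exact ⟨kw, hkwm, (PySem.Chars.isIn_iff_infix _ _).mpr
          ((kw_lines_iff (hkws kw hkwm).1 (hkws kw hkwm).2 cs).mp ⟨l, hl, hin⟩)⟩
      · exact ⟨l, hl, hf⟩
    · rintro ⟨l, hl, hf⟩
      exact ⟨l, hl, by rw [Bool.or_eq_true]; exact Or.inr hf⟩

-- ===== VERDICT (by name: the statement is the Claim_ definition above) =====
theorem ist_echter_fehler_spec : Claim_equal_ist_echter_fehler := by
  intro stdout stderr _
  unfold Spec_ist_echter_fehler ist_echter_fehler ist_echter_fehler_alt
  by_cases h : stderr = ""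
  · rw [if_pos h, if_pos h]
    exact main_eq stdout.toList
  · rw [if_neg h, if_neg h]
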